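-- pv_equiv track=rewrite | github.com/andresmit/wikiXMLParser | images.py | balancedSquareBrackets
-- ===== SOURCE A (Python) =====
-- def balancedSquareBrackets(text):
--     """returns text between balanced first occurrence of [ and last """
--     openbr = 0
--     cur = 0
--     for char in text:
--         cur +=1
--         if char == '[':
--             openbr += 1
--         if char == ']':
--             openbr -= 1
--         if openbr == 0:
--             break
--     return (text[:cur])
-- ===== SOURCE B (Python) =====
-- def balancedSquareBrackets(text):
--     """returns text between balanced first occurrence of [ and last """
--     deltas = [1 if c == '[' else (-1 if c == ']' else 0) for c in text]
--     balances = []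
--     s = 0
--     for d in deltas:
--         s += d
--         balances.append(s)
--     for i, v in enumerate(balances):
--         if v == 0:
--             return text[:i + 1]
--     return text[:len(text)]
-- ===== Notes on version B (the rewrite author's own statement) =====
-- stated objective: alternative
-- what changed: B replaces A's single fused scan with mutable counter and break by a two-phase decomposition: first build the full running-balance prefix table via map+accumulate, then separately search it for the first zero and slice there (whole text if none).
import Mathlib
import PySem

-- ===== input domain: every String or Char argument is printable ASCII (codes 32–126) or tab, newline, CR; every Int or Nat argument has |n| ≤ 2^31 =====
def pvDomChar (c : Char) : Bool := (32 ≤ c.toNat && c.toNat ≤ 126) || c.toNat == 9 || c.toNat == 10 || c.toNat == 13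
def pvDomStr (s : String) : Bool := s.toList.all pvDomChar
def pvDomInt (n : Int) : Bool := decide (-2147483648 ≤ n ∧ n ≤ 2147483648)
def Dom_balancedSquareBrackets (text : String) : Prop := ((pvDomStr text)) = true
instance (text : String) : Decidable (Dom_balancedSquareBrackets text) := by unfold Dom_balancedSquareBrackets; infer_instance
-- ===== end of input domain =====

-- B replaces A's fused counter-and-break scan by a two-phase decomposition (prefix-balance table, then first-zero search); same O(n) cost, alternative structure.


-- ===== PORT A =====
-- A's loop: cur counts consumed chars, openbr the bracket balance; break when balance hits 0.
def pvLoopA : List Char → Int → Nat → Nat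
  | [], _, cur => cur
  | ch :: t, openbr, cur =>
      let cur' := cur + 1
      let ob1 := if ch = '[' then openbr + 1 else openbr
      let ob2 := if ch = ']' then ob1 - 1 else ob1
      if ob2 = 0 then cur' else pvLoopA t ob2 cur'

def balancedSquareBrackets (text : String) : String :=
  String.ofList (text.toList.take (pvLoopA text.toList 0 0))

-- ===== PORT B =====
def pvDelta (c : Char) : Int := if c = '[' then 1 else if c = ']' then -1 else 0

-- running-balance prefix table (itertools.accumulate-style)
def pvAccum : List Int → Int → List Int
  | [], _ => []
  | d :: t, s => (s + d) :: pvAccum t (s + d)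

def balancedSquareBrackets_alt (text : String) : String :=
  let balances := pvAccum (text.toList.map pvDelta) 0
  match balances.findIdx? (fun v => v == 0) with
  | some i => String.ofList (text.toList.take (i + 1))
  | none => String.ofList (text.toList.take text.toList.length)

-- ===== PRECONDITION & SPEC =====
def Spec_balancedSquareBrackets (text : String) (out : String) : Prop := out = balancedSquareBrackets_alt text
instance (text : String) (out : String) : Decidable (Spec_balancedSquareBrackets text out) := by unfold Spec_balancedSquareBrackets; infer_instance

-- ===== CLAIM (what is proved, stated in full; the proofs are below) =====
def Claim_equal_balancedSquareBrackets : Prop := ∀ (text : String), Dom_balancedSquareBrackets text → Spec_balancedSquareBrackets text (balancedSquareBrackets text)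

-- ===== LEMMAS AND PROOFS =====

lemma pvLoopA_eq (l : List Char) (b : Int) (cur : Nat) :
    pvLoopA l b cur =
      cur + (match (pvAccum (l.map pvDelta) b).findIdx? (fun v => v == 0) with
             | some i => i + 1
             | none => l.length) := by
  induction l generalizing b cur with
  | nil => simp [pvLoopA, pvAccum]
  | cons ch t ih =>
      have hstep : (if ch = ']' then (if ch = '[' then b + 1 else b) - 1
                    else (if ch = '[' then b + 1 else b)) = b + pvDelta ch := by
        unfold pvDelta
        split_ifs with h1 h2 h3 <;> first | omega | (exfalso; subst h1; simp_all)
      simp only [pvLoopA, List.map_cons, pvAccum, List.findIdx?_cons, hstep]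
      by_cases hz : b + pvDelta ch = 0
      · simp [hz]
      · have : ((b + pvDelta ch) == 0) = false := by simpa using hz
        rw [if_neg hz, this]
        simp only [Bool.false_eq_true, if_false]
        rw [ih _ (cur + 1)]
        cases (pvAccum (t.map pvDelta) (b + pvDelta ch)).findIdx? (fun v => v == 0) with
        | none => simp [Option.map]; ring
        | some i => simp [Option.map]; ring

-- ===== VERDICT (by name: the statement is the Claim_ definition above) =====
theorem balancedSquareBrackets_spec : Claim_equal_balancedSquareBrackets := by
  intro text _
  unfold Spec_balancedSquareBrackets balancedSquareBrackets balancedSquareBrackets_alt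
  rw [pvLoopA_eq]
  cases h : (pvAccum (text.toList.map pvDelta) 0).findIdx? (fun v => v == 0) <;> simp [h]
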